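-- pv_equiv track=rewrite | github.com/SebastianVintonuke/TDA-Test | backtracking/obtener_combinaciones.py | obtener_combinaciones
-- ===== SOURCE A (Python) =====
-- def obtener_combinaciones(materias):
--     combinaciones = []
--     for materia in materias:
--         for curso in materia:
--             materias_restantes = [ m for m in materias if m != materia ]
--             resultado = obtener_combinaciones_rec(materias_restantes, [curso])
--             if resultado:
--                 combinaciones.append(resultado)
--                 break
--     return combinaciones
--
-- def obtener_combinaciones_rec(materias, cursos_tomados):
--     if not materias:
--         return cursos_tomados
--
--     materia_actual = materias.pop()
--     for curso_candidato in materia_actual: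
--         if all(son_compatibles(curso_candidato, curso) for curso in cursos_tomados):
--             cursos_tomados.append(curso_candidato)
--             resultado = obtener_combinaciones_rec(materias, cursos_tomados)
--             if resultado:
--                 return resultado
--             cursos_tomados.remove(curso_candidato)
--     materias.append(materia_actual)
--     return None
--
-- def son_compatibles(curso_1, curso_2):
--     """
--     Determina si dos cursos son compatibles.
--     Cada curso es un diccionario con la clave 'horarios' (set de tuplas).
--     """
--     return curso_1['horarios'].isdisjoint(curso_2['horarios'])
-- ===== SOURCE B (Python) =====
-- # B: same backtracking search expressed as a fold that composes closure stages
-- # (continuation-passing), with immutable chosen-lists instead of A's mutating recursion.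
--
-- def _etapa(cursos, continuar):
--     def intentar(elegidos):
--         for c in cursos:
--             if all(c['horarios'].isdisjoint(e['horarios']) for e in elegidos):
--                 r = continuar(elegidos + [c])
--                 if r:
--                     return r
--         return None
--     return intentar
--
-- def _resolver(materias):
--     solucion = lambda elegidos: elegidos
--     for cursos in materias:
--         solucion = _etapa(cursos, solucion)
--     return solucion
--
-- def obtener_combinaciones(materias):
--     combinaciones = []
--     for materia in materias:
--         buscar = _resolver([m for m in materias if m != materia])
--         for curso in materia:
--             resultado = buscar([curso])
--             if resultado:
--                 combinaciones.append(resultado)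
--                 break
--     return combinaciones
-- ===== Notes on version B (the rewrite author's own statement) =====
-- stated objective: alternative
-- what changed: The mutating recursive backtracking (pop/append/remove on shared lists) is re-expressed as a fold that composes one closure stage per subject (continuation-passing style) over immutable chosen-lists, visiting subjects and candidates in the same order; the restantes solver is also hoisted out of the per-course loop.
import Mathlib
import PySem

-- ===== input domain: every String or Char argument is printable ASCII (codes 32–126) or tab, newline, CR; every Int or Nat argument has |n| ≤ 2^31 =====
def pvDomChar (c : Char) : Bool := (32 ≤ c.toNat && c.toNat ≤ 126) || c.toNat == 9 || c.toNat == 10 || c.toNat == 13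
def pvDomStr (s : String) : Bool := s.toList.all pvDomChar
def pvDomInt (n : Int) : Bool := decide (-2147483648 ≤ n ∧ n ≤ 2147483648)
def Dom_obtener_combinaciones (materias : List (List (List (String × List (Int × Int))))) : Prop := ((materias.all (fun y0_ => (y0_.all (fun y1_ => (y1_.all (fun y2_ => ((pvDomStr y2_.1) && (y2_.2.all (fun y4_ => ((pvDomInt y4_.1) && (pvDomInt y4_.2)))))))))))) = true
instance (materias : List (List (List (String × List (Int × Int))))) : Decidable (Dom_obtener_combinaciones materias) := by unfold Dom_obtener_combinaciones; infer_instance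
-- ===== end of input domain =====

-- B re-expresses A's mutating recursive backtracking as a fold composing closure stages
-- (continuation passing) over immutable chosen-lists; objective: alternative decomposition,
-- same search order and cost.

-- A curso is a Python dict str -> set[tuple[int,int]] (association list with distinct keys);
-- a materia is a list of cursos.
abbrev PvCurso := List (String × List (Int × Int))
abbrev PvMateria := List PvCurso

-- ---- shared Python-semantics helpers (Python's ==/['horarios'] on these values) ----

-- curso['horarios'] (total stand-in: Pre_ guarantees the key is present wherever A touches it)
def horariosDe (c : PvCurso) : List (Int × Int) := (PySem.Dict.mk c).getD "horarios" []

-- Python dict ==: same key set, values compared as sets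
def pyEqCurso (c1 c2 : PvCurso) : Bool :=
  (c1.all fun kv => match (PySem.Dict.mk c2).get? kv.1 with
                    | some w => PySem.Set.equal kv.2 w
                    | none => false) &&
  (c2.all fun kv => match (PySem.Dict.mk c1).get? kv.1 with
                    | some w => PySem.Set.equal kv.2 w
                    | none => false)

-- Python list == on lists of dicts
def pyEqMateria (m1 m2 : PvMateria) : Bool :=
  m1.length == m2.length && (m1.zip m2).all fun p => pyEqCurso p.1 p.2

-- ===== PORT A =====

def sonCompatibles (c1 c2 : PvCurso) : Bool :=
  PySem.Set.isdisjoint (horariosDe c1) (horariosDe c2)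

-- cursos_tomados.remove(c): drop the first element == c (ValueError case — element absent —
-- is unreachable in A, the removed candidate was just appended; then this returns the list unchanged)
def removeFirstCurso : List PvCurso → PvCurso → List PvCurso
  | [], _ => []
  | e :: rest, c => if pyEqCurso e c then rest else e :: removeFirstCurso rest c

-- the 'for curso_candidato in materia_actual' loop of obtener_combinaciones_rec;
-- the second component threads the cursos_tomados list (mutated in place in Python)
def tryLoop (f : List PvCurso → Option (List PvCurso) × List PvCurso) :
    List PvCurso → List PvCurso → Option (List PvCurso) × List PvCurso
  | [], cursos => (none, cursos)
  | c :: cs, cursos =>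
    if cursos.all (fun e => sonCompatibles c e) then
      match f (cursos ++ [c]) with
      | (some r, s) => if r.isEmpty then tryLoop f cs (removeFirstCurso s c) else (some r, s)
      | (none, s) => tryLoop f cs (removeFirstCurso s c)
    else tryLoop f cs cursos

-- obtener_combinaciones_rec: pop() takes the LAST materia
def recA (ms : List PvMateria) (cursos : List PvCurso) : Option (List PvCurso) × List PvCurso :=
  if h : ms = [] then (some cursos, cursos)
  else tryLoop (fun x => recA ms.dropLast x) (ms.getLast h) cursos
  termination_by ms.length
  decreasing_by
    simp only [List.length_dropLast]
    have := List.length_pos_of_ne_nil h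
    omega

-- the inner 'for curso in materia: ... if resultado: break' loop
def innerA (materias : List PvMateria) (materia : PvMateria) : List PvCurso → Option (List PvCurso)
  | [] => none
  | curso :: rest =>
    let restantes := materias.filter fun m => !(pyEqMateria m materia)
    match (recA restantes [curso]).1 with
    | some r => if r.isEmpty then innerA materias materia rest else some r
    | none => innerA materias materia rest

def obtener_combinaciones (materias : List (List (List (String × List (Int × Int))))) : List (List (List (String × List (Int × Int)))) :=
  materias.foldl (fun combinaciones materia =>
    match innerA materias materia materia with
    | some r => combinaciones ++ [r]
    | none => combinaciones) []

-- ===== PORT B =====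

def esCompatibleConTodos (c : PvCurso) (elegidos : List PvCurso) : Bool :=
  elegidos.all fun e => PySem.Set.isdisjoint (horariosDe c) (horariosDe e)

-- the loop body of _etapa's 'intentar'
def buscarEn : List PvCurso → (List PvCurso → Option (List PvCurso)) → List PvCurso → Option (List PvCurso)
  | [], _, _ => none
  | c :: cs, continuar, elegidos =>
    if esCompatibleConTodos c elegidos then
      match continuar (elegidos ++ [c]) with
      | some r => if r.isEmpty then buscarEn cs continuar elegidos else some r
      | none => buscarEn cs continuar elegidos
    else buscarEn cs continuar elegidos

def etapa (cursos : List PvCurso) (continuar : List PvCurso → Option (List PvCurso)) :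
    List PvCurso → Option (List PvCurso) :=
  fun elegidos => buscarEn cursos continuar elegidos

-- _resolver: fold the subjects into one solver closure
def resolver (materias : List PvMateria) : List PvCurso → Option (List PvCurso) :=
  materias.foldl (fun solucion cursos => etapa cursos solucion) (fun elegidos => some elegidos)

-- the 'for curso in materia: ... if resultado: break' loop of B
def primerExito (buscar : List PvCurso → Option (List PvCurso)) : List PvCurso → Option (List PvCurso)
  | [] => none
  | curso :: rest =>
    match buscar [curso] with
    | some r => if r.isEmpty then primerExito buscar rest else some r
    | none => primerExito buscar rest

def obtener_combinaciones_alt (materias : List (List (List (String × List (Int × Int))))) : List (List (List (String × List (Int × Int)))) :=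
  materias.foldl (fun combinaciones materia =>
    let buscar := resolver (materias.filter fun m => !(pyEqMateria m materia))
    match primerExito buscar materia with
    | some r => combinaciones ++ [r]
    | none => combinaciones) []

-- ===== PRECONDITION & SPEC =====

-- two ==-equal cursos in distinct subjects must have nonempty horarios
def okPairB (c1 c2 : PvCurso) : Bool :=
  !pyEqCurso c1 c2 || (!(horariosDe c1).isEmpty && !(horariosDe c2).isEmpty)
def okMatB (m1 m2 : PvMateria) : Bool := m1.all fun c1 => m2.all fun c2 => okPairB c1 c2
def pairwiseOk : List PvMateria → Bool
  | [] => true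
  | m :: rest => (rest.all fun m' => okMatB m m') && pairwiseOk rest

def tieneHorarios (c : PvCurso) : Bool := (PySem.Dict.mk c).contains "horarios"

-- every curso the search can possibly compare has the key 'horarios': for each outer materia,
-- if its restantes list is nonempty and does not end in an empty subject (either of which makes
-- every attempt succeed/fail before any comparison), the cursos of the materia itself and of the
-- maximal all-nonempty suffix of restantes (the only subjects the end-popping recursion can reach)
-- must all carry the key
def clavesAlcanzables (materias : List PvMateria) : Bool :=
  materias.all fun materia =>
    materia.isEmpty ||
    (let rest := materias.filter fun m => !(pyEqMateria m materia)
     rest.isEmpty ||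
     ((rest.getLast?.getD []).isEmpty ||
      (materia.all tieneHorarios &&
       (rest.reverse.takeWhile fun m => !m.isEmpty).all fun m => m.all tieneHorarios)))

-- Pre_ excludes (1) inputs on which some comparison the search can reach touches a curso lacking
-- the key 'horarios' (son_compatibles raises KeyError there; still slightly wider than the exact
-- raise set, since reachability is approximated by list shape, not by simulating compatibility),
-- (2) association lists in which a curso repeats a key (those do not encode a Python dict, so
-- they denote no Python input), and (3) inputs where an ==-equal pair of empty-horarios cursos
-- sits in two different subjects: there A's cursos_tomados.remove can drop the OLDER equal copy
-- and accidentally scramble the order of the returned combination — a corner where both orders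
-- are equally defensible.
def Pre_obtener_combinaciones (materias : List (List (List (String × List (Int × Int))))) : Prop :=
  clavesAlcanzables materias = true ∧
  (∀ m ∈ materias, ∀ c ∈ m, (c.map Prod.fst).Nodup) ∧
  pairwiseOk materias = true

instance (materias : List (List (List (String × List (Int × Int))))) : Decidable (Pre_obtener_combinaciones materias) := by
  unfold Pre_obtener_combinaciones; infer_instance

def pvWitness_obtener_combinaciones : (List (List (List (String × List (Int × Int))))) :=
  [[[("horarios", [(1, 2)])], [("horarios", [(2, 3)])]], [[("horarios", [(3, 4)])]]]

def Spec_obtener_combinaciones (materias : List (List (List (String × List (Int × Int))))) (out : List (List (List (String × List (Int × Int))))) : Prop := out = obtener_combinaciones_alt materias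
instance (materias : List (List (List (String × List (Int × Int))))) (out : List (List (List (String × List (Int × Int))))) : Decidable (Spec_obtener_combinaciones materias out) := by unfold Spec_obtener_combinaciones; infer_instance

-- ===== CLAIM (what is proved, stated in full; the proofs are below) =====
def Claim_equal_obtener_combinaciones : Prop := ∀ (materias : List (List (List (String × List (Int × Int))))), Dom_obtener_combinaciones materias → Pre_obtener_combinaciones materias → Spec_obtener_combinaciones materias (obtener_combinaciones materias)

-- ===== LEMMAS AND PROOFS =====

-- invariant carried through the search: no curso of a pending subject is ==-equal to a chosen
-- curso (or to a curso of another pending subject) unless both have nonempty horarios; all keys distinct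
def Pinv (ms : List PvMateria) (cursos : List PvCurso) : Prop :=
  (∀ m ∈ ms, ∀ c ∈ m, ∀ e ∈ cursos, okPairB c e = true) ∧
  List.Pairwise (fun a b => okMatB a b = true) ms ∧
  (∀ m ∈ ms, ∀ c ∈ m, (c.map Prod.fst).Nodup) ∧
  (∀ e ∈ cursos, (e.map Prod.fst).Nodup)

-- "A's recursion and B's solver agree, and A restores cursos_tomados exactly on failure"
def LockstepP (ms : List PvMateria) (cursos : List PvCurso) : Prop :=
  (resolver ms cursos = none → recA ms cursos = (none, cursos)) ∧
  (∀ v, resolver ms cursos = some v → recA ms cursos = (some v, v) ∧ ∃ t, v = cursos ++ t)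

lemma pyEqSet_refl (v : List (Int × Int)) : PySem.Set.equal v v = true :=
  (PySem.Set.equal_iff v v).mpr fun _ => Iff.rfl

lemma get?_mk_of_mem (c : PvCurso) (kv : String × List (Int × Int)) (hkv : kv ∈ c)
    (h : (c.map Prod.fst).Nodup) : (PySem.Dict.mk c).get? kv.1 = some kv.2 :=
  PySem.Dict.get?_of_mem_items _ hkv (by simpa [PySem.Dict.keys] using h)

lemma pyEqCurso_refl (c : PvCurso) (h : (c.map Prod.fst).Nodup) : pyEqCurso c c = true := by
  unfold pyEqCurso
  simp only [Bool.and_eq_true, List.all_eq_true]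
  constructor <;> intro kv hkv <;> rw [get?_mk_of_mem c kv hkv h] <;>
    simp [pyEqSet_refl kv.2]

lemma pyEqCurso_symm (a b : PvCurso) : pyEqCurso a b = pyEqCurso b a := by
  unfold pyEqCurso; exact Bool.and_comm _ _

lemma zip_self_curso (m : PvMateria) (h : ∀ c ∈ m, (c.map Prod.fst).Nodup) :
    ∀ p ∈ m.zip m, pyEqCurso p.1 p.2 = true := by
  induction m with
  | nil => intro p hp; simp at hp
  | cons a t ih =>
    intro p hp
    rw [List.zip_cons_cons] at hp
    rcases List.mem_cons.mp hp with hp | hp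
    · subst hp; exact pyEqCurso_refl a (h a (by simp))
    · exact ih (fun c hc => h c (List.mem_cons_of_mem _ hc)) p hp

lemma pyEqMateria_refl (m : PvMateria) (h : ∀ c ∈ m, (c.map Prod.fst).Nodup) :
    pyEqMateria m m = true := by
  unfold pyEqMateria
  rw [Bool.and_eq_true, List.all_eq_true]
  exact ⟨by simp, zip_self_curso m h⟩

lemma okPairB_symm (a b : PvCurso) : okPairB a b = okPairB b a := by
  unfold okPairB; rw [pyEqCurso_symm, Bool.and_comm]

-- ==-equal cursos with nonempty horarios are never compatible
lemma sonCompatibles_eq_false (c e : PvCurso) (heq : pyEqCurso c e = true)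
    (hne : horariosDe c ≠ []) : sonCompatibles c e = false := by
  have hg : (PySem.Dict.mk c).get? "horarios" = some (horariosDe c) := by
    unfold horariosDe at hne ⊢
    rw [PySem.Dict.getD_eq_get?_getD] at hne ⊢
    cases hx : (PySem.Dict.mk c).get? "horarios" with
    | none => rw [hx] at hne; simp at hne
    | some v => simp
  have hmem : ("horarios", horariosDe c) ∈ c :=
    PySem.Dict.mem_items_of_get?_eq_some _ hg
  have h1 := (Bool.and_eq_true _ _).mp heq |>.1
  rw [List.all_eq_true] at h1
  have h2 := h1 _ hmem
  simp only at h2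
  cases hge : (PySem.Dict.mk e).get? "horarios" with
  | none => rw [hge] at h2; simp at h2
  | some w =>
    rw [hge] at h2
    simp only at h2
    have hew : horariosDe e = w := by
      unfold horariosDe; exact PySem.Dict.getD_of_get?_eq_some _ _ hge
    obtain ⟨x, hx⟩ := List.exists_mem_of_ne_nil _ hne
    have hxw : x ∈ w := ((PySem.Set.equal_iff _ _).mp h2 x).mp hx
    unfold sonCompatibles PySem.Set.isdisjoint
    rw [hew]
    simp only [Bool.not_eq_false', List.any_eq_true]
    exact ⟨x, hx, by simpa using hxw⟩

lemma removeFirst_append_self (l : List PvCurso) (c : PvCurso)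
    (hl : ∀ e ∈ l, pyEqCurso e c = false) (hc : pyEqCurso c c = true) :
    removeFirstCurso (l ++ [c]) c = l := by
  induction l with
  | nil => simp [removeFirstCurso, hc]
  | cons e t ih =>
    simp only [List.cons_append, removeFirstCurso, hl e (by simp)]
    simp only [Bool.false_eq_true, if_false]
    rw [ih (fun x hx => hl x (List.mem_cons_of_mem _ hx))]

lemma esCompatible_eq (c : PvCurso) (l : List PvCurso) :
    esCompatibleConTodos c l = l.all fun e => sonCompatibles c e := rfl

lemma pairwiseOk_iff (l : List PvMateria) :
    pairwiseOk l = true ↔ l.Pairwise (fun a b => okMatB a b = true) := by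
  induction l with
  | nil => simp [pairwiseOk]
  | cons m rest ih =>
    simp [pairwiseOk, List.pairwise_cons, ih, List.all_eq_true, and_comm]

lemma recA_nil (cursos : List PvCurso) : recA [] cursos = (some cursos, cursos) := by
  rw [recA]; rfl

lemma recA_snoc (ms : List PvMateria) (m : PvMateria) (cursos : List PvCurso) :
    recA (ms ++ [m]) cursos = tryLoop (fun x => recA ms x) m cursos := by
  rw [recA]
  rw [dif_neg (by simp)]
  simp

lemma resolver_nil (cursos : List PvCurso) : resolver [] cursos = some cursos := rfl

lemma resolver_snoc (ms : List PvMateria) (m : PvMateria) (cursos : List PvCurso) :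
    resolver (ms ++ [m]) cursos = buscarEn m (resolver ms) cursos := by
  simp [resolver, List.foldl_append, etapa]

lemma Pinv_step (ms : List PvMateria) (m : PvMateria) (cursos : List PvCurso) (c : PvCurso)
    (hP : Pinv (ms ++ [m]) cursos) (hc : c ∈ m) : Pinv ms (cursos ++ [c]) := by
  obtain ⟨h1, h2, h3, h4⟩ := hP
  refine ⟨?_, ?_, ?_, ?_⟩
  · intro m' hm' c' hc' e he
    rcases List.mem_append.mp he with he | he
    · exact h1 m' (List.mem_append_left _ hm') c' hc' e he
    · have hee : e = c := by simpa using he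
      subst hee
      have hmat : okMatB m' m = true :=
        (List.pairwise_append.mp h2).2.2 m' hm' m (by simp)
      unfold okMatB at hmat
      rw [List.all_eq_true] at hmat
      have := hmat c' hc'
      rw [List.all_eq_true] at this
      exact this e hc
  · exact List.Pairwise.sublist (List.sublist_append_left ms [m]) h2
  · intro m' hm' c' hc'
    exact h3 m' (List.mem_append_left _ hm') c' hc'
  · intro e he
    rcases List.mem_append.mp he with he | he
    · exact h4 e he
    · have hee : e = c := by simpa using he
      subst hee
      exact h3 m (List.mem_append_right _ (by simp)) e hc

lemma tryLoop_lockstep (ms : List PvMateria) (m : PvMateria)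
    (ih : ∀ cursos, Pinv ms cursos → cursos ≠ [] → LockstepP ms cursos) :
    ∀ cs cursos, (∀ c ∈ cs, c ∈ m) → Pinv (ms ++ [m]) cursos → cursos ≠ [] →
      (buscarEn cs (resolver ms) cursos = none →
        tryLoop (fun x => recA ms x) cs cursos = (none, cursos)) ∧
      (∀ v, buscarEn cs (resolver ms) cursos = some v →
        tryLoop (fun x => recA ms x) cs cursos = (some v, v) ∧ ∃ t, v = cursos ++ t) := by
  intro cs
  induction cs with
  | nil =>
    intro cursos hsub hP hne
    exact ⟨fun _ => rfl, fun v hv => by simp [buscarEn] at hv⟩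
  | cons c rest ihc =>
    intro cursos hsub hP hne
    have hcm : c ∈ m := hsub c List.mem_cons_self
    have hsub' : ∀ x ∈ rest, x ∈ m := fun x hx => hsub x (List.mem_cons_of_mem _ hx)
    by_cases hcomp : (cursos.all fun e => sonCompatibles c e) = true
    · have hPc : Pinv ms (cursos ++ [c]) := Pinv_step ms m cursos c hP hcm
      have hlock := ih (cursos ++ [c]) hPc (by simp)
      cases hk : resolver ms (cursos ++ [c]) with
      | some v =>
        obtain ⟨hA, t, ht⟩ := hlock.2 v hk
        have hvne : v.isEmpty = false := by subst ht; simp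
        constructor
        · intro hres
          exfalso
          simp only [buscarEn, esCompatible_eq, hcomp, if_true, hk, hvne] at hres
          simp at hres
        · intro v' hv'
          simp only [buscarEn, esCompatible_eq, hcomp, if_true, hk, hvne] at hv'
          simp only [Bool.false_eq_true, if_false, Option.some.injEq] at hv'
          subst hv'
          refine ⟨?_, [c] ++ t, by simpa using ht⟩
          simp only [tryLoop, hcomp, if_true, hA, hvne]
          simp
      | none =>
        have hA := hlock.1 hk
        have hrem : removeFirstCurso (cursos ++ [c]) c = cursos := by
          apply removeFirst_append_self
          · intro e he
            by_contra hbad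
            rw [Bool.not_eq_false] at hbad
            have hec : pyEqCurso c e = true := by rw [pyEqCurso_symm]; exact hbad
            have hok : okPairB c e = true :=
              hP.1 m (List.mem_append_right _ (by simp)) c hcm e he
            unfold okPairB at hok
            rw [hec] at hok
            simp only [Bool.not_true, Bool.false_or, Bool.and_eq_true,
              Bool.not_eq_true'] at hok
            have hnonnil : horariosDe c ≠ [] := by
              intro h0; rw [h0] at hok; simp at hok
            have hfalse := sonCompatibles_eq_false c e hec hnonnil
            rw [List.all_eq_true] at hcomp
            have := hcomp e he
            simp only [hfalse] at this
            exact absurd this (by simp)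
          · exact pyEqCurso_refl c (hP.2.2.1 m (List.mem_append_right _ (by simp)) c hcm)
        have step := ihc cursos hsub' hP hne
        constructor
        · intro hres
          simp only [buscarEn, esCompatible_eq, hcomp, if_true, hk] at hres
          have := step.1 hres
          simp only [tryLoop, hcomp, if_true, hA, hrem]
          exact this
        · intro v hv
          simp only [buscarEn, esCompatible_eq, hcomp, if_true, hk] at hv
          have := step.2 v hv
          simp only [tryLoop, hcomp, if_true, hA, hrem]
          exact this
    · have hncomp' : (cursos.all fun e => sonCompatibles c e) = false := by
        simpa using hcomp
      have hBcomp : esCompatibleConTodos c cursos = false := by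
        rw [esCompatible_eq]; exact hncomp'
      have step := ihc cursos hsub' hP hne
      constructor
      · intro hres
        simp only [buscarEn, hBcomp, Bool.false_eq_true, if_false] at hres
        simp only [tryLoop, hncomp', Bool.false_eq_true, if_false]
        exact step.1 hres
      · intro v hv
        simp only [buscarEn, hBcomp, Bool.false_eq_true, if_false] at hv
        simp only [tryLoop, hncomp', Bool.false_eq_true, if_false]
        exact step.2 v hv

lemma main_lockstep : ∀ (ms : List PvMateria) (cursos : List PvCurso),
    Pinv ms cursos → cursos ≠ [] → LockstepP ms cursos := by
  intro ms
  induction ms using List.reverseRecOn with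
  | nil =>
    intro cursos _ _
    constructor
    · intro h; rw [resolver_nil] at h; cases h
    · intro v hv
      rw [resolver_nil] at hv
      cases hv
      exact ⟨recA_nil cursos, [], by simp⟩
  | append_singleton ms m ih =>
    intro cursos hP hne
    have h := tryLoop_lockstep ms m ih m cursos (fun _ hx => hx) hP hne
    constructor
    · intro hres
      rw [resolver_snoc] at hres
      rw [recA_snoc]
      exact h.1 hres
    · intro v hv
      rw [resolver_snoc] at hv
      rw [recA_snoc]
      exact h.2 v hv

lemma Pinv_init (materias : List PvMateria) (materia : PvMateria) (curso : PvCurso)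
    (hpre : Pre_obtener_combinaciones materias) (hm : materia ∈ materias) (hc : curso ∈ materia) :
    Pinv (materias.filter fun m' => !(pyEqMateria m' materia)) [curso] := by
  obtain ⟨hkey, hnd, hpw⟩ := hpre
  have hpair := (pairwiseOk_iff materias).mp hpw
  have hsym : Symmetric (fun a b : PvMateria => okMatB a b = true) := by
    intro a b h
    unfold okMatB at h ⊢
    rw [List.all_eq_true] at h ⊢
    intro c1 hc1
    rw [List.all_eq_true]
    intro c2 hc2
    have := h c2 hc2
    rw [List.all_eq_true] at this
    rw [okPairB_symm]
    exact this c1 hc1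
  refine ⟨?_, ?_, ?_, ?_⟩
  · intro m' hm' c' hc' e he
    have hee : e = curso := by simpa using he
    subst hee
    obtain ⟨hm'mem, hkeep⟩ := List.mem_filter.mp hm'
    have hne : m' ≠ materia := by
      intro h
      subst h
      rw [pyEqMateria_refl m' (fun c hc0 => hnd m' hm c hc0)] at hkeep
      simp at hkeep
    have hmat : okMatB m' materia = true := hpair.forall hsym hm'mem hm hne
    unfold okMatB at hmat
    rw [List.all_eq_true] at hmat
    have := hmat c' hc'
    rw [List.all_eq_true] at this
    exact this e hc
  · exact List.Pairwise.sublist List.filter_sublist hpair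
  · intro m' hm' c' hc'
    exact hnd m' (List.mem_filter.mp hm').1 c' hc'
  · intro e he
    have hee : e = curso := by simpa using he
    subst hee
    exact hnd materia hm e hc

lemma innerA_eq (materias : List PvMateria) (materia : PvMateria)
    (hpre : Pre_obtener_combinaciones materias) (hm : materia ∈ materias) :
    ∀ cs, (∀ c ∈ cs, c ∈ materia) →
      innerA materias materia cs =
        primerExito (resolver (materias.filter fun m' => !(pyEqMateria m' materia))) cs := by
  intro cs
  induction cs with
  | nil => simp [innerA, primerExito]
  | cons curso rest ihc =>
    intro hsub
    have hc : curso ∈ materia := hsub _ List.mem_cons_self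
    have hP := Pinv_init materias materia curso hpre hm hc
    have hlock := main_lockstep _ [curso] hP (by simp)
    have hrest := ihc (fun x hx => hsub x (List.mem_cons_of_mem _ hx))
    cases hk : resolver (materias.filter fun m' => !(pyEqMateria m' materia)) [curso] with
    | some v =>
      obtain ⟨hA, t, ht⟩ := hlock.2 v hk
      have hvne : v.isEmpty = false := by subst ht; simp
      simp only [innerA, primerExito, hk, hA, hvne]
      simp
    | none =>
      have hA := hlock.1 hk
      simp only [innerA, primerExito, hk, hA]
      exact hrest

-- ===== VERDICT (by name: the statement is the Claim_ definition above) =====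
theorem obtener_combinaciones_spec : Claim_equal_obtener_combinaciones := by
  intro materias _ hpre
  unfold Spec_obtener_combinaciones obtener_combinaciones obtener_combinaciones_alt
  apply PySem.List.foldl_congr_mem
  intro acc materia hmem
  rw [innerA_eq materias materia hpre hmem materia (fun _ h => h)]
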